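-- pv_equiv track=rewrite | github.com/JUNGJUNSEO/programmers | 코딩테스트 연습/위장.py | solution
-- ===== SOURCE A (Python) =====
-- def solution(clothes):
--     d = dict()
--     for cloth, kind in clothes:
--         d[cloth] = kind
--     answer = 0
--     for i in d:
--         for j in d:
--             if d[i] == d[j]:
--                 continue
--             answer += 1
--     answer = len(d)+answer//2
--     return answer
-- ===== SOURCE B (Python) =====
-- def solution(clothes):
--     d = {}
--     for cloth, kind in clothes:
--         d[cloth] = kind
--     counts = {}
--     for kind in d.values():
--         counts[kind] = counts.get(kind, 0) + 1
--     n = len(d)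
--     return n + (n * (n - 1) - sum(c * (c - 1) for c in counts.values())) // 2
-- ===== Notes on version B (the rewrite author's own statement) =====
-- stated objective: faster
-- what changed: Replaces A's quadratic double loop comparing every pair of dict entries with a single pass that counts clothes per kind and the closed form n + (n*(n-1) - sum c*(c-1)) // 2.
import Mathlib
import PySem

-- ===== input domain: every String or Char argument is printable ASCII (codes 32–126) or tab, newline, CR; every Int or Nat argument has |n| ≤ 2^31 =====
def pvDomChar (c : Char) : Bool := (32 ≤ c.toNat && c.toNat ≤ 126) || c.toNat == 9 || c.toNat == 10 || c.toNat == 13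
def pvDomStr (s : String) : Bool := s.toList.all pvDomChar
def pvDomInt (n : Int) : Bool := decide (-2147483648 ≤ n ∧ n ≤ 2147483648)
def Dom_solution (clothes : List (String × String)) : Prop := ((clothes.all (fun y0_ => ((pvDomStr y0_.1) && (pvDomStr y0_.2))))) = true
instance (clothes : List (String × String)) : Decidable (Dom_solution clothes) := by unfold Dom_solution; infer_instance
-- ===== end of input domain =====

-- B replaces A's double loop over the dict with per-kind counts and the closed
-- form n + (n·(n−1) − Σ c·(c−1)) // 2 (objective: faster).

-- ===== PORT A =====
def solution (clothes : List (String × String)) : Int :=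
  let d := clothes.foldl (fun d p => d.insert p.1 p.2) (PySem.Dict.empty : PySem.Dict String String)
  let answer : Int := d.keys.foldl (fun acc i =>
      d.keys.foldl (fun acc j =>
        if d.get? i == d.get? j then acc else acc + 1) acc) 0
  (d.size : Int) + PySem.Int.floordiv answer 2

-- ===== PORT B =====
def solution_alt (clothes : List (String × String)) : Int :=
  let d := clothes.foldl (fun d p => d.insert p.1 p.2) (PySem.Dict.empty : PySem.Dict String String)
  let counts := d.values.foldl (fun c k => c.insert k (c.getD k 0 + 1)) (PySem.Dict.empty : PySem.Dict String Int)
  let n : Int := d.size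
  n + PySem.Int.floordiv (n * (n - 1) - (counts.values.map (fun c => c * (c - 1))).sum) 2

-- ===== PRECONDITION & SPEC =====
def Spec_solution (clothes : List (String × String)) (out : Int) : Prop := out = solution_alt clothes
instance (clothes : List (String × String)) (out : Int) : Decidable (Spec_solution clothes out) := by unfold Spec_solution; infer_instance

-- ===== CLAIM (what is proved, stated in full; the proofs are below) =====
def Claim_equal_solution : Prop := ∀ (clothes : List (String × String)), Dom_solution clothes → Spec_solution clothes (solution clothes)

-- ===== LEMMAS AND PROOFS =====

-- countP of a negated test
theorem pv_countP_not (l : List String) (p : String → Bool) :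
    l.countP (fun j => !(p j)) = l.length - l.countP p := by
  induction l with
  | nil => simp
  | cons a t ih =>
    have hle := List.countP_le_length (p := p) (l := t)
    by_cases h : p a = true
    · simp [h, ih]
    · simp [h, ih]
      omega

-- count of a value in a mapped list as a countP on the source
theorem pv_count_map (l : List String) (v : String → String) (x : String) :
    (l.map v).count x = l.countP (fun j => v j == x) := by
  induction l with
  | nil => rfl
  | cons a t ih => simp [List.count_cons, List.countP_cons, ih]

-- every key of the dict is looked up to `some` of its getD value
theorem pv_get?_of_mem_keys (d : PySem.Dict String String) (k : String) (h : k ∈ d.keys) :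
    d.get? k = some (d.getD k "") := by
  have h1 : d.get? k ≠ none := by simp [PySem.Dict.get?_eq_none_iff_not_mem_keys, h]
  obtain ⟨w, hw⟩ := Option.ne_none_iff_exists'.mp h1
  rw [hw, PySem.Dict.getD_of_get?_eq_some d "" hw]

-- sum of f over a list = sum over its distinct elements of multiplicity · f
theorem pv_sum_map_eq_sum_set_count (vs : List String) (f : String → Int) :
    (vs.map f).sum = ((PySem.Set.ofList vs).map (fun k => (vs.count k : Int) * f k)).sum := by
  have h1 : (vs.map f).sum = ∑ a ∈ vs.toFinset, (vs.count a : Int) * f a := by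
    have h := Finset.sum_multiset_map_count (vs : Multiset String) f
    simpa [nsmul_eq_mul] using h
  have h0 : (PySem.Set.ofList vs).toFinset = vs.toFinset := by
    ext a; simp [List.mem_toFinset, PySem.Set.mem_ofList]
  have h2 : ∑ a ∈ vs.toFinset, (vs.count a : Int) * f a
      = ((PySem.Set.ofList vs).map (fun k => (vs.count k : Int) * f k)).sum := by
    rw [← h0]
    exact List.sum_toFinset _ (PySem.Set.nodup_ofList vs)
  rw [h1, h2]

-- the whole arithmetic identity, stated over an arbitrary dict with Nodup keys
theorem pv_main (d : PySem.Dict String String) (hnd : d.keys.Nodup) :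
    (d.size : Int) + PySem.Int.floordiv
      (d.keys.foldl (fun acc i =>
        d.keys.foldl (fun acc j =>
          if d.get? i == d.get? j then acc else acc + 1) acc) 0) 2
    = (d.size : Int) + PySem.Int.floordiv
      ((d.size : Int) * ((d.size : Int) - 1) -
        (((d.values.foldl (fun c k => c.insert k (c.getD k 0 + 1))
            (PySem.Dict.empty : PySem.Dict String Int)).values).map (fun c => c * (c - 1))).sum) 2 := by
  have hvals : d.values = d.keys.map (fun k => d.getD k "") :=
    PySem.Dict.values_eq_map_keys d hnd ""
  have hlen : d.values.length = d.keys.length := by rw [hvals, List.length_map]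
  have hsz : (d.size : Int) = (d.keys.length : Int) := by
    simp [PySem.Dict.size, PySem.Dict.keys]
  -- A's inner loop
  have hinner : ∀ (acc : Int) (i : String), i ∈ d.keys →
      d.keys.foldl (fun acc j => if d.get? i == d.get? j then acc else acc + 1) acc
      = acc + ((d.keys.length : Int) - (d.values.count (d.getD i "") : Int)) := by
    intro acc i hi
    rw [PySem.List.foldl_congr_mem d.keys
      (fun acc j => if d.get? i == d.get? j then acc else acc + 1)
      (fun acc j => if !(d.get? i == d.get? j) then acc + 1 else acc)
      acc (by intro a j _; by_cases h : (d.get? i == d.get? j) = true <;> simp [h])]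
    rw [PySem.List.foldl_if_add_one]
    have hc2 : d.keys.countP (fun j => d.get? i == d.get? j)
        = d.values.count (d.getD i "") := by
      rw [hvals, pv_count_map]
      apply List.countP_congr
      intro j hj
      rw [pv_get?_of_mem_keys d i hi, pv_get?_of_mem_keys d j hj]
      simp [Option.some_beq_some, Bool.beq_comm]
    have hc := pv_countP_not d.keys (fun j => d.get? i == d.get? j)
    have hle := List.countP_le_length (p := fun j => d.get? i == d.get? j) (l := d.keys)
    rw [hc, hc2] at *
    omega
  -- A's outer loop
  have houter :
      d.keys.foldl (fun acc i =>
        d.keys.foldl (fun acc j =>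
          if d.get? i == d.get? j then acc else acc + 1) acc) 0
      = (d.values.map (fun x => (d.keys.length : Int) - (d.values.count x : Int))).sum := by
    rw [PySem.List.foldl_congr_mem d.keys
      (fun acc i => d.keys.foldl (fun acc j =>
        if d.get? i == d.get? j then acc else acc + 1) acc)
      (fun acc i => acc + ((d.keys.length : Int) - (d.values.count (d.getD i "") : Int)))
      0 (by intro acc i hi; exact hinner acc i hi)]
    rw [PySem.List.foldl_add]
    rw [hvals, List.map_map]
    simp [Function.comp_def]
  -- B's counter
  have hcnt : (d.values.foldl (fun c k => c.insert k (c.getD k 0 + 1))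
      (PySem.Dict.empty : PySem.Dict String Int)).values
      = (PySem.Set.ofList d.values).map (fun k => (d.values.count k : Int)) := by
    rw [PySem.Dict.foldl_insert_getD_add_one_eq_counter]
    simp [PySem.Dict.values, PySem.Dict.items_counter, List.map_map]
  -- sums
  have hS2 := pv_sum_map_eq_sum_set_count d.values (fun x => (d.values.count x : Int))
  have hS3 : ((PySem.Set.ofList d.values).map (fun k => (d.values.count k : Int))).sum
      = (d.values.length : Int) := by
    have h := pv_sum_map_eq_sum_set_count d.values (fun _ => (1 : Int))
    rw [PySem.List.sum_map_const_int] at h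
    rw [List.map_congr_left (l := PySem.Set.ofList d.values)
      (f := fun k => (d.values.count k : Int)) (g := fun k => (d.values.count k : Int) * 1)
      (by intro k _; ring)]
    omega
  have hsplit : ((PySem.Set.ofList d.values).map (fun k => (d.values.count k : Int) * (d.values.count k : Int))).sum
      = ((PySem.Set.ofList d.values).map (fun k => (d.values.count k : Int) * ((d.values.count k : Int) - 1))).sum
        + ((PySem.Set.ofList d.values).map (fun k => (d.values.count k : Int))).sum := by
    rw [← PySem.List.sum_map_add_int]
    apply congrArg List.sum
    apply List.map_congr_left
    intro k _
    ring
  -- A's answer closed form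
  have hAsum : (d.values.map (fun x => (d.keys.length : Int) - (d.values.count x : Int))).sum
      + (d.values.map (fun x => (d.values.count x : Int))).sum
      = (d.values.length : Int) * (d.keys.length : Int) := by
    have h := PySem.List.sum_map_add_int d.values
      (fun x => (d.keys.length : Int) - (d.values.count x : Int))
      (fun x => (d.values.count x : Int))
    rw [← h]
    rw [List.map_congr_left (g := fun _ => (d.keys.length : Int)) (by intro x _; ring)]
    rw [PySem.List.sum_map_const_int]
  rw [houter, hcnt, List.map_map]
  have hml : ((PySem.Set.ofList d.values).map
      ((fun c => c * (c - 1)) ∘ fun k => (d.values.count k : Int))).sum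
      = ((PySem.Set.ofList d.values).map (fun k => (d.values.count k : Int) * ((d.values.count k : Int) - 1))).sum := rfl
  rw [hml]
  congr 1
  apply congrArg (fun z => PySem.Int.floordiv z 2)
  rw [hsz]
  have hlen' : (d.values.length : Int) = (d.keys.length : Int) := by exact_mod_cast hlen
  rw [hlen'] at hAsum hS3
  have hr : ((d.keys.length : Int)) * ((d.keys.length : Int) - 1)
      = (d.keys.length : Int) * (d.keys.length : Int) - (d.keys.length : Int) := by ring
  linarith [hS2, hS3, hsplit, hAsum, hr]

-- ===== VERDICT (by name: the statement is the Claim_ definition above) =====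
theorem solution_spec : Claim_equal_solution := by
  intro clothes _
  unfold Spec_solution solution solution_alt
  have hnd : ((clothes.foldl (fun d p => d.insert p.1 p.2)
      (PySem.Dict.empty : PySem.Dict String String)).keys).Nodup := by
    exact PySem.Dict.nodup_keys_foldl_insert_key clothes Prod.fst (fun _ p => p.2)
      PySem.Dict.empty PySem.Dict.nodup_keys_empty
  exact pv_main _ hnd
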